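-- pv_equiv track=rewrite | github.com/humancipher/Programming_Contest | Programming_Contest/AtCoder/ABC/ABC_100-199/ABC_180-189/ABC_189/ABC_189_D.py | solve
-- ===== SOURCE A (Python) =====
-- def solve(S,N):
--     dp = [[0 for _ in range(2)] for _ in range(N+1)] #dp[i][j]:yi = jになる(x0,...,xi)のパターン数
--     dp[0][0],dp[0][1] = 1,1
--     for i in range(N):
--         if S[i] == "AND":
--             dp[i+1][0] = dp[i][0] * 2 + dp[i][1] * 1
--             dp[i+1][1] = dp[i][0] * 0 + dp[i][1] * 1
--         else:
--             dp[i+1][0] = dp[i][0] * 1 + dp[i][1] * 0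
--             dp[i+1][1] = dp[i][0] * 1 + dp[i][1] * 2
--     return dp[N][1]
-- ===== SOURCE B (Python) =====
-- def solve(S, N):
--     # Single accumulator: the total number of assignments after step i is p = 2**(i+1),
--     # so only the true-count t needs tracking (false-count = p - t).
--     t, p = 1, 2
--     for i in range(N):
--         if S[i] != "AND":
--             t += p
--         p += p
--     return t
-- ===== Notes on version B (the rewrite author's own statement) =====
-- stated objective: simpler
-- what changed: Replaces the 2-lane (N+1)-row DP table with a single integer accumulator t, using the invariant that the total number of assignments after step i is 2^(i+1), so the false-count is implicit and only non-AND steps add 2^(i+1) to t.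
import Mathlib
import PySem

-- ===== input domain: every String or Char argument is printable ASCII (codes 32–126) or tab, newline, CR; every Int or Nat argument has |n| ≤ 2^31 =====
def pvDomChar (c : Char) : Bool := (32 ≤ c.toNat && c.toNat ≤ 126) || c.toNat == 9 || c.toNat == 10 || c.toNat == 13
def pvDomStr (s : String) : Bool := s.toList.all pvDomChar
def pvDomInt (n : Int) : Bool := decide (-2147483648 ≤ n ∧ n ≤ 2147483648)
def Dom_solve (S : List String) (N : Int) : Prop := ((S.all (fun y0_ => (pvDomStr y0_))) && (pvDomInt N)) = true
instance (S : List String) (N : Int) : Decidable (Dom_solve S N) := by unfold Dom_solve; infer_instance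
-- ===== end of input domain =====

-- B replaces A's 2-lane DP table with one integer accumulator (false-count is implicit): simpler, O(1) extra space.

-- ===== PORT A =====
-- one DP step: from row dp[i] build row dp[i+1] (branch order as in A)
def solveStepA (S : List String) (dp : List (Int × Int)) (i : Nat) : List (Int × Int) :=
  let cur := dp.getD i (0, 0)
  let s := (PySem.List.pyGet? S (i : Int)).getD ""
  if s = "AND" then
    dp ++ [(cur.1 * 2 + cur.2 * 1, cur.1 * 0 + cur.2 * 1)]
  else
    dp ++ [(cur.1 * 1 + cur.2 * 0, cur.1 * 1 + cur.2 * 2)]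

def solveTableA (S : List String) (n : Nat) : List (Int × Int) :=
  (List.range n).foldl (solveStepA S) [(1, 1)]

def solve (S : List String) (N : Int) : Int :=
  ((solveTableA S N.toNat).getD N.toNat (0, 0)).2

-- ===== PORT B =====
def solve_alt (S : List String) (N : Int) : Int :=
  ((List.range N.toNat).foldl
    (fun (tp : Int × Int) (i : Nat) =>
      ((if (PySem.List.pyGet? S ((i : Int))).getD "" ≠ "AND" then tp.1 + tp.2 else tp.1),
       tp.2 + tp.2))
    (1, 2)).1

-- ===== PRECONDITION & SPEC =====
-- A raises IndexError when N < 0 (dp[0] on an empty table) or N > len(S) (S[i] out of range).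
def Pre_solve (S : List String) (N : Int) : Prop := 0 ≤ N ∧ N ≤ (S.length : Int)
instance (S : List String) (N : Int) : Decidable (Pre_solve S N) := by unfold Pre_solve; infer_instance
def pvWitness_solve : List String × Int := (["AND", "OR"], 2)

def Spec_solve (S : List String) (N : Int) (out : Int) : Prop := out = solve_alt S N
instance (S : List String) (N : Int) (out : Int) : Decidable (Spec_solve S N out) := by unfold Spec_solve; infer_instance

-- ===== CLAIM (what is proved, stated in full; the proofs are below) =====
def Claim_equal_solve : Prop := ∀ (S : List String) (N : Int), Dom_solve S N → Pre_solve S N → Spec_solve S N (solve S N)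

-- ===== LEMMAS AND PROOFS =====
def solveAccB (S : List String) (n : Nat) : Int × Int :=
  (List.range n).foldl
    (fun (tp : Int × Int) (i : Nat) =>
      ((if (PySem.List.pyGet? S ((i : Int))).getD "" ≠ "AND" then tp.1 + tp.2 else tp.1),
       tp.2 + tp.2))
    (1, 2)

-- invariant: B's pair is (t, 2^(n+1)) and A's last table row is (2^(n+1) - t, t)
theorem solve_invariant (S : List String) (n : Nat) :
    (solveAccB S n).2 = 2 ^ (n + 1) ∧
    (solveTableA S n).length = n + 1 ∧
    (solveTableA S n).getD n (0, 0) = (2 ^ (n + 1) - (solveAccB S n).1, (solveAccB S n).1) := by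
  induction n with
  | zero => simp [solveTableA, solveAccB]
  | succ n ih =>
    obtain ⟨hp, hlen, hlast⟩ := ih
    have hT : solveTableA S (n + 1) = solveStepA S (solveTableA S n) n := by
      simp [solveTableA, List.range_succ]
    have hB : solveAccB S (n + 1) =
        ((if (PySem.List.pyGet? S ((n : Int))).getD "" ≠ "AND" then
            (solveAccB S n).1 + (solveAccB S n).2 else (solveAccB S n).1),
         (solveAccB S n).2 + (solveAccB S n).2) := by
      simp only [solveAccB, List.range_succ, List.foldl_append, List.foldl_cons, List.foldl_nil]
    have hget : ∀ (xs : List (Int × Int)) (x : Int × Int), xs.length = n + 1 →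
        (xs ++ [x]).getD (n + 1) (0, 0) = x := by
      intro xs x hx
      rw [List.getD_eq_getElem?_getD, List.getElem?_append_right (by omega)]
      simp [hx]
    refine ⟨by rw [hB]; simp [hp]; ring, ?_, ?_⟩
    · rw [hT]; unfold solveStepA
      by_cases h : (PySem.List.pyGet? S ((n : Int))).getD "" = "AND"
      · rw [if_pos h]; simp [hlen]
      · rw [if_neg h]; simp [hlen]
    · by_cases h : (PySem.List.pyGet? S ((n : Int))).getD "" = "AND"
      · rw [hT, hB, if_neg (not_not_intro h)]
        unfold solveStepA
        rw [if_pos h]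
        rw [hget _ _ hlen, hlast]
        simp only [hp, Prod.mk.injEq]
        exact ⟨by ring, by ring⟩
      · rw [hT, hB, if_pos h]
        unfold solveStepA
        rw [if_neg h]
        rw [hget _ _ hlen, hlast]
        simp only [hp, Prod.mk.injEq]
        exact ⟨by ring, by ring⟩

-- ===== VERDICT (by name: the statement is the Claim_ definition above) =====
theorem solve_spec : Claim_equal_solve := by
  intro S N _ _
  unfold Spec_solve solve
  rw [(solve_invariant S N.toNat).2.2]
  rfl
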